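-- pv_equiv track=rewrite | github.com/jbrunclik/aoc2025 | day6.py | part1
-- ===== SOURCE A (Python) =====
-- from dataclasses import dataclass
-- from enum import Enum
-- from math import prod
--
-- class Operation(Enum):
--     """Operation type."""
--
--     ADD = "+"
--     MULTIPLY = "*"
--
-- @dataclass
-- class Problem:
--     """Math problem."""
--
--     operation: Operation
--     values: list[int]
--
--     def __int__(self) -> int:
--         if self.operation == Operation.ADD:
--             return sum(self.values)
--         elif self.operation == Operation.MULTIPLY:
--             return prod(self.values)
--         else:
--             raise NotImplementedError(self.operation)
--
-- def part1(lines: list[str]) -> int: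
--     """Return sum of problems using traditional math."""
--     rows = [line.split() for line in lines]
--
--     problems = [
--         Problem(
--             Operation(rows[-1][i]),
--             [int(rows[j][i]) for j in range(len(rows) - 1)],
--         )
--         for i in range(len(rows[0]))
--     ]
--
--     return sum(int(p) for p in problems)
-- ===== SOURCE B (Python) =====
-- from enum import Enum
--
--
-- class Operation(Enum):
--     """Operation type."""
--
--     ADD = "+"
--     MULTIPLY = "*"
--
--
-- def part1(lines):
--     """Return sum of problems using traditional math (row-major running fold)."""
--     rows = [line.split() for line in lines]
--     ncols = len(rows[0])
--     ops = [Operation(tok) for tok in rows[-1][:ncols]]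
--     acc = [0 if op is Operation.ADD else 1 for op in ops]
--     for row in rows[:-1]:
--         acc = [a + int(c) if op is Operation.ADD else a * int(c)
--                for (a, op), c in zip(zip(acc, ops), row)]
--     return sum(acc)
-- ===== Notes on version B (the rewrite author's own statement) =====
-- stated objective: alternative
-- what changed: B replaces A's column-major construction of Problem objects (one inner pass over all rows per column, then a second summing pass) by a single row-major sweep that keeps one running accumulator per column (0 for '+', 1 for '*') and sums the accumulators at the end.
import Mathlib
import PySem

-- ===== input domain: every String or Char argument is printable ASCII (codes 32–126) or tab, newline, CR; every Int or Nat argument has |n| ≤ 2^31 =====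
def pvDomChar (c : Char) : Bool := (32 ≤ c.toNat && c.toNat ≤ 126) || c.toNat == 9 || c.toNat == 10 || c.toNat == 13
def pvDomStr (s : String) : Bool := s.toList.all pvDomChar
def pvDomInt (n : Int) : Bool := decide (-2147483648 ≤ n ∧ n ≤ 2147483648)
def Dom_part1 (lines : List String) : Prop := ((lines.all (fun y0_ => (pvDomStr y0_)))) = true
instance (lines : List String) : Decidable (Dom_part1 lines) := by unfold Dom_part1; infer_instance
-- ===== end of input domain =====

-- B replaces A's column-major two-pass computation by a single row-major sweep with
-- one running accumulator per column; same asymptotic cost (objective: alternative).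

-- ===== PORT A =====
-- A: rows = split lines; for each column i build Problem(op=rows[-1][i], values=[int(rows[j][i])]),
-- then sum(int(p)) where int(p) = sum(values) for '+', prod(values) otherwise.
def part1 (lines : List String) : Int :=
  let rows := lines.map PySem.Str.split₀
  let problems :=
    (PySem.List.pyRange 0 (((PySem.List.pyGet? rows 0).getD []).length : Int) 1).map (fun i =>
      (PySem.List.pyGetD (PySem.List.pyGetD rows (-1) []) i "",
       (PySem.List.pyRange 0 ((rows.length : Int) - 1) 1).map (fun j =>
         (PySem.Int.ofStr? (PySem.List.pyGetD (PySem.List.pyGetD rows j []) i "")).getD 0)))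
  (problems.map (fun p => if p.1 = "+" then p.2.sum else p.2.prod)).sum

-- ===== PORT B =====
-- B: ops from the last row (first ncols tokens), per-column accumulators seeded 0/'+' or 1/'*',
-- one fold over the data rows updating every accumulator, then sum.
def part1_alt (lines : List String) : Int :=
  let rows := lines.map PySem.Str.split₀
  let ncols := ((PySem.List.pyGet? rows 0).getD []).length
  let ops := PySem.List.slice ((PySem.List.pyGet? rows (-1)).getD []) none (some (ncols : Int))
  let acc0 := ops.map (fun op => if op = "+" then (0 : Int) else 1)
  let accF := (PySem.List.slice rows none (some (-1))).foldl
    (fun acc row =>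
      ((acc.zip ops).zip row).map (fun p =>
        if p.1.2 = "+" then p.1.1 + (PySem.Int.ofStr? p.2).getD 0
        else p.1.1 * (PySem.Int.ofStr? p.2).getD 0)) acc0
  accF.sum

-- ===== PRECONDITION & SPEC =====
-- Pre_ excludes exactly the inputs where A raises: empty input (IndexError on rows[0]),
-- a row shorter than the first row (IndexError), a non-'+'/'*' operator token in the last
-- row (ValueError from Operation(...)), or a data cell that int() rejects (ValueError).
def Pre_part1 (lines : List String) : Prop :=
  lines ≠ [] ∧
  (∀ l ∈ lines, (PySem.Str.split₀ (lines.headD "")).length ≤ (PySem.Str.split₀ l).length) ∧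
  (∀ t ∈ (PySem.Str.split₀ (lines.getLastD "")).take (PySem.Str.split₀ (lines.headD "")).length,
      t = "+" ∨ t = "*") ∧
  (∀ l ∈ lines.dropLast,
      ∀ c ∈ (PySem.Str.split₀ l).take (PySem.Str.split₀ (lines.headD "")).length,
        (PySem.Int.ofStr? c).isSome = true)
instance (lines : List String) : Decidable (Pre_part1 lines) := by unfold Pre_part1; infer_instance
def pvWitness_part1 : List String := ["1 2", "3 4", "+ *"]
def Spec_part1 (lines : List String) (out : Int) : Prop := out = part1_alt lines
instance (lines : List String) (out : Int) : Decidable (Spec_part1 lines out) := by unfold Spec_part1; infer_instance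

-- ===== CLAIM (what is proved, stated in full; the proofs are below) =====
def Claim_equal_part1 : Prop := ∀ (lines : List String), Dom_part1 lines → Pre_part1 lines → Spec_part1 lines (part1 lines)

-- ===== LEMMAS AND PROOFS =====

theorem pv_dropLast_getLastD {α : Type} (l : List α) (h : l ≠ []) (d : α) :
    l.dropLast ++ [l.getLastD d] = l := by
  rw [List.getLastD_eq_getLast?, List.getLast?_eq_some_getLast h, Option.getD_some,
    List.dropLast_concat_getLast]

def pvV (c : String) : Int := (PySem.Int.ofStr? c).getD 0
def pvUpd (op : String) (a : Int) (c : String) : Int := if op = "+" then a + pvV c else a * pvV c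

theorem pv_range_getD (acc : List Int) : (List.range acc.length).map (fun i => acc.getD i 0) = acc := by
  apply List.ext_getElem
  · simp
  · intro i h1 h2
    simp only [List.getElem_map, List.getElem_range, List.getD_eq_getElem?_getD,
      List.getElem?_eq_getElem h2, Option.getD_some]

theorem pv_foldl_mul {α : Type} (l : List α) (f : α → Int) (a : Int) :
    l.foldl (fun acc x => acc * f x) a = a * (l.map f).prod := by
  induction l generalizing a with
  | nil => simp
  | cons x t ih => simp [ih, mul_assoc]

theorem pvFoldB (ops : List String) (drows : List (List String)) :
    ∀ acc : List Int, acc.length = ops.length → (∀ r ∈ drows, ops.length ≤ r.length) →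
    drows.foldl (fun acc row => ((acc.zip ops).zip row).map (fun p =>
        if p.1.2 = "+" then p.1.1 + (PySem.Int.ofStr? p.2).getD 0
        else p.1.1 * (PySem.Int.ofStr? p.2).getD 0)) acc
    = (List.range ops.length).map (fun i =>
        drows.foldl (fun a r => pvUpd (ops.getD i "") a (r.getD i "")) (acc.getD i 0)) := by
  induction drows with
  | nil =>
    intro acc h1 _
    simp only [List.foldl_nil]
    rw [← h1, pv_range_getD]
  | cons r t ih =>
    intro acc h1 h2
    simp only [List.foldl_cons]
    rw [ih _ (by have := h2 r List.mem_cons_self; simp [List.length_zip, h1]; omega) (fun r hr => h2 r (List.mem_cons_of_mem _ hr))]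
    apply List.map_congr_left
    intro i hi
    simp only [List.mem_range] at hi
    congr 1
    have hr : ops.length ≤ r.length := h2 r (List.mem_cons_self)
    have hia : i < acc.length := by omega
    have hir : i < r.length := Nat.lt_of_lt_of_le hi hr
    have hz : i < (((acc.zip ops).zip r)).length := by simp [List.length_zip, h1]; omega
    simp only [List.getD_eq_getElem?_getD, List.getElem?_map,
      List.getElem?_eq_getElem hz, List.getElem?_eq_getElem hia, List.getElem?_eq_getElem hi,
      List.getElem?_eq_getElem hir, Option.map_some, Option.getD_some]
    simp [pvUpd, pvV, List.getElem_zip]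

theorem pv_map_pyRange_nat {β : Type} (n : Nat) (g : Int → β) :
    (PySem.List.pyRange 0 (n : Int) 1).map g = (List.range n).map (fun k : Nat => g (k : Int)) := by
  have h0 : ((n : Int) - 0).toNat = n := by omega
  rw [PySem.List.pyRange_one, List.map_map, h0]
  exact List.map_congr_left (fun a _ => by norm_num)

theorem pv_head0 {α : Type} (xs : List α) (d : α) : (xs[0]?).getD d = xs.headD d := by
  cases xs <;> simp

theorem pv_head_map (dl : List String) (ll : String) (f : String → List String) :
    (dl.map f ++ [f ll]).headD [] = f ((dl ++ [ll]).headD "") := by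
  cases dl <;> simp

theorem pv_map_rows {β : Type} (data : List (List String)) (lastR : List String)
    (g : List String → β) :
    (PySem.List.pyRange 0 ((data.length : Int)) 1).map
      (fun j => g (PySem.List.pyGetD (data ++ [lastR]) j [])) = data.map g := by
  rw [pv_map_pyRange_nat]
  apply List.ext_getElem
  · simp
  · intro i h1 h2
    simp only [List.getElem_map, List.getElem_range]
    rw [PySem.List.pyGetD_natCast]
    rw [List.getD_eq_getElem?_getD, List.getElem?_append_left (by simpa using h2),
      List.getElem?_eq_getElem (by simpa using h2)]
    simp

theorem pv_main (dl : List String) (ll : String)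
    (hlen : ∀ l ∈ dl ++ [ll],
      (PySem.Str.split₀ ((dl ++ [ll]).headD "")).length ≤ (PySem.Str.split₀ l).length) :
    part1 (dl ++ [ll]) = part1_alt (dl ++ [ll]) := by
  unfold part1 part1_alt
  simp only [List.map_append, List.map_cons, List.map_nil]
  set data := dl.map PySem.Str.split₀ with hdata
  set lastR := PySem.Str.split₀ ll with hlastR
  -- head / ncols
  have hhead : ((PySem.List.pyGet? (data ++ [lastR]) 0).getD []) =
      PySem.Str.split₀ ((dl ++ [ll]).headD "") := by
    rw [PySem.List.pyGet?_zero, pv_head0]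
    exact pv_head_map dl ll _
  rw [hhead]
  set n := (PySem.Str.split₀ ((dl ++ [ll]).headD "")).length with hn
  have hnlast : n ≤ lastR.length := hlen ll (by simp)
  -- rewrite the B-side slices
  rw [PySem.List.pyGet?_neg_one_append_singleton, Option.getD_some,
    PySem.List.slice_to_natCast, PySem.List.slice_to_neg_one, List.dropLast_concat]
  set ops := lastR.take n with hops
  have hopslen : ops.length = n := by simp [hops, hnlast]
  -- rewrite the A-side
  rw [PySem.List.pyGetD_neg_one_append_singleton]
  have hblen : ((data ++ [lastR]).length : Int) - 1 = (data.length : Int) := by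
    simp
  rw [hblen]
  rw [pv_map_pyRange_nat n, List.map_map]
  -- B fold
  rw [pvFoldB ops data _ (by simp) ?hrows]
  case hrows =>
    intro r hr
    rw [hopslen]
    simp only [hdata, List.mem_map] at hr
    obtain ⟨l, hl, rfl⟩ := hr
    exact hlen l (by simp [hl])
  rw [hopslen]
  congr 1
  apply List.map_congr_left
  intro i hi
  simp only [List.mem_range] at hi
  simp only [Function.comp_apply]
  -- simplify A's term for column i
  rw [pv_map_rows data lastR (fun row =>
    (PySem.Int.ofStr? (PySem.List.pyGetD row (i : Int) "")).getD 0)]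
  simp only [PySem.List.pyGetD_natCast]
  -- ops.getD i "" = lastR.getD i ""
  have hop : ops.getD i "" = lastR.getD i "" := by
    rw [List.getD_eq_getElem?_getD, List.getD_eq_getElem?_getD, hops,
      List.getElem?_take_of_lt hi]
  have hacc : (ops.map (fun op => if op = "+" then (0:Int) else 1)).getD i 0 =
      if lastR.getD i "" = "+" then (0:Int) else 1 := by
    have hio : i < ops.length := by omega
    rw [List.getD_eq_getElem?_getD, List.getElem?_map, List.getElem?_eq_getElem hio]
    simp only [Option.map_some, Option.getD_some]
    rw [← hop, List.getD_eq_getElem?_getD, List.getElem?_eq_getElem hio]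
    simp
  rw [hacc, hop]
  -- both sides per column
  by_cases h : lastR.getD i "" = "+"
  · simp only [h, pvUpd, pvV, if_true]
    rw [PySem.List.foldl_add (g := fun r : List String => (PySem.Int.ofStr? (r.getD i "")).getD 0)]
    simp
  · simp only [pvUpd, pvV, h, if_false]
    rw [pv_foldl_mul data (fun r : List String => (PySem.Int.ofStr? (r.getD i "")).getD 0)]
    simp

-- ===== VERDICT (by name: the statement is the Claim_ definition above) =====
theorem part1_spec : Claim_equal_part1 := by
  unfold Claim_equal_part1
  intro lines _ hpre
  obtain ⟨hne, hlen, -, -⟩ := hpre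
  unfold Spec_part1
  obtain ⟨dl, ll, rfl⟩ : ∃ dl ll, lines = dl ++ [ll] :=
    ⟨lines.dropLast, lines.getLastD "", (pv_dropLast_getLastD lines hne "").symm⟩
  exact pv_main dl ll hlen
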